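-- pv_equiv track=rewrite | github.com/zombiezen/turbohvz | hvz/email.py | _clean_plain
-- ===== SOURCE A (Python) =====
-- def _clean_plain(text):
--     text = text.strip()
--     lines = []
--     for line in text.splitlines():
--         line = line.strip()
--         try:
--             last_line = lines[-1]
--         except IndexError:
--             last_line = None
--         if line or last_line:
--             # Only allow one blank line between text chunks
--             lines.append(line)
--     return '\r\n'.join(lines)
--     '\r\n'.join(line.strip() for line in text.splitlines())
-- ===== SOURCE B (Python) =====
-- def _clean_plain(text):
--     # Group non-blank stripped lines into paragraphs, then join paragraphs
--     # with one blank line; blank lines are never stored.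
--     paragraphs = []
--     current = []
--     for line in text.strip().splitlines():
--         line = line.strip()
--         if line:
--             current.append(line)
--         elif current:
--             paragraphs.append(current)
--             current = []
--     if current:
--         paragraphs.append(current)
--     return '\r\n\r\n'.join('\r\n'.join(p) for p in paragraphs)
-- ===== Notes on version B (the rewrite author's own statement) =====
-- stated objective: alternative
-- what changed: Replaces A's flat filter that decides each line by inspecting the last line already emitted with a two-level paragraph structure: non-blank stripped lines are grouped into paragraphs (blank lines are never stored, only used as paragraph breaks), and the result is assembled by joining lines with CRLF inside each paragraph and paragraphs with a CRLF CRLF separator.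
import Mathlib
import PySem

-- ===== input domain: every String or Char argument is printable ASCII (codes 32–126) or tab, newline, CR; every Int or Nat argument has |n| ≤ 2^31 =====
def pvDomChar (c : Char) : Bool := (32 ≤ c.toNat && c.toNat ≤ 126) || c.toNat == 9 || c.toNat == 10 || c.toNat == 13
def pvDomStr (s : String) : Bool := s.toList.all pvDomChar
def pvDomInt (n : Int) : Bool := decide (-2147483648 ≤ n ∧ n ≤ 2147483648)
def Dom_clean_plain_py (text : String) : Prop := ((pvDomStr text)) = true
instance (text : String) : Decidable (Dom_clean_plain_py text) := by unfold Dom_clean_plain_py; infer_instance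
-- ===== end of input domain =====

-- B replaces A's flat filter (each line kept or dropped by looking at the last emitted
-- line) with a two-level paragraph structure: non-blank stripped lines are grouped into
-- paragraphs, blank lines only end a paragraph, and the output is a double join.

-- ===== PORT A =====
def clean_plain_py (text : String) : String :=
  let t := PySem.Str.strip text
  let lines := (PySem.Str.splitlines t).foldl
    (fun lines line =>
      let line := PySem.Str.strip line
      let last_line : Option String := PySem.List.pyGet? lines (-1)
      if line != "" || (match last_line with | some s => s != "" | none => false) then
        lines ++ [line]
      else lines) []
  PySem.Str.join "\r\n" lines

-- ===== PORT B =====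
def clean_plain_py_alt (text : String) : String :=
  let st := (PySem.Str.splitlines (PySem.Str.strip text)).foldl
    (fun (st : List (List String) × List String) line =>
      let line := PySem.Str.strip line
      if line != "" then (st.1, st.2 ++ [line])
      else if st.2 != [] then (st.1 ++ [st.2], []) else st)
    ([], [])
  let paragraphs := if st.2 != [] then st.1 ++ [st.2] else st.1
  PySem.Str.join "\r\n\r\n" (paragraphs.map (fun p => PySem.Str.join "\r\n" p))

-- ===== PRECONDITION & SPEC =====
def Spec_clean_plain_py (text : String) (out : String) : Prop := out = clean_plain_py_alt text
instance (text : String) (out : String) : Decidable (Spec_clean_plain_py text out) := by unfold Spec_clean_plain_py; infer_instance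

-- ===== CLAIM (what is proved, stated in full; the proofs are below) =====
def Claim_equal_clean_plain_py : Prop := ∀ (text : String), Dom_clean_plain_py text → Spec_clean_plain_py text (clean_plain_py text)

-- ===== LEMMAS AND PROOFS =====

-- A's loop body (after the inner strip) and B's loop body, as named step functions.
def pvStepA (acc : List String) (l : String) : List String :=
  if l != "" || (match PySem.List.pyGet? acc (-1) with | some s => s != "" | none => false) then
    acc ++ [l]
  else acc

def pvStepB (st : List (List String) × List String) (l : String) : List (List String) × List String :=
  if l != "" then (st.1, st.2 ++ [l])
  else if st.2 != [] then (st.1 ++ [st.2], []) else st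

-- the flat line list a paragraph list denotes: paragraphs separated by one blank element
def pvCat {α : Type} (blank : α) : List (List α) → List α
  | [] => []
  | p :: ps => p ++ ps.flatMap (fun q => blank :: q)

def pvGlue (st : List (List String) × List String) : List String :=
  pvCat "" (st.1 ++ (if st.2 ≠ [] then [st.2] else []))

def pvPend (st : List (List String) × List String) : List String :=
  if st.2 = [] ∧ st.1 ≠ [] then [""] else []

-- the line-break predicate of PySem.Chars.splitlines, as a named function
def pvIsB (c : Char) : Bool :=
  have n := c.toNat
  decide (n = 10) || decide (n = 13) || decide (n = 11) || decide (n = 12) || decide (n = 28) ||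
    decide (n = 29) || decide (n = 30) || decide (n = 133) || decide (n = 8232) || decide (n = 8233)

theorem pvStepA_cond (acc : List String) (l : String) :
    pvStepA acc l =
      if l != "" || acc.getLast?.getD "" != "" then acc ++ [l] else acc := by
  unfold pvStepA
  rw [PySem.List.pyGet?_neg_one]
  cases acc.getLast? <;> simp

theorem pvCat_append_singleton {α : Type} (b : α) (ps : List (List α)) (q : List α) :
    pvCat b (ps ++ [q]) = pvCat b ps ++ (if ps = [] then q else b :: q) := by
  cases ps with
  | nil => simp [pvCat]
  | cons p ps => simp [pvCat]

theorem pvCat_map {α β : Type} (f : α → β) (b : α) (ps : List (List α)) :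
    (pvCat b ps).map f = pvCat (f b) (ps.map (List.map f)) := by
  cases ps with
  | nil => simp [pvCat]
  | cons p ps =>
    simp only [pvCat, List.map_cons, List.map_append, List.map_flatMap, List.flatMap_map]

-- one step of A's loop = one step of B's loop, through the flattening
theorem pvStep (st : List (List String) × List String) (l : String)
    (hc : ∀ x ∈ st.2, x ≠ "") :
    pvStepA (pvGlue st ++ pvPend st) l = pvGlue (pvStepB st l) ++ pvPend (pvStepB st l) := by
  rw [pvStepA_cond]
  by_cases hl : l = ""
  · subst hl
    by_cases hcur : st.2 = []
    · have hB : pvStepB st "" = st := by simp [pvStepB, hcur]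
      rw [hB]
      by_cases hP : st.1 = []
      · simp [pvGlue, pvPend, hcur, hP, pvCat]
      · simp [pvGlue, pvPend, hcur, hP]
    · have hB : pvStepB st "" = (st.1 ++ [st.2], []) := by simp [pvStepB, hcur]
      have h1 : pvPend st = [] := by simp [pvPend, hcur]
      have h2 : pvGlue st = pvCat "" st.1 ++ (if st.1 = [] then st.2 else "" :: st.2) := by
        simp [pvGlue, hcur, pvCat_append_singleton]
      obtain ⟨g, hg, hmem⟩ : ∃ g, st.2.getLast? = some g ∧ g ∈ st.2 := by
        cases h : st.2 with
        | nil => exact absurd h hcur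
        | cons a t => exact ⟨(a :: t).getLast (by simp), by simp [List.getLast?_eq_some_getLast],
            List.getLast_mem (by simp)⟩
      have hcons : ("" :: st.2).getLast? = st.2.getLast? := by
        cases h : st.2 with
        | nil => exact absurd h hcur
        | cons b t => simp [List.getLast?]
      have hge : (pvGlue st).getLast? = some g := by
        rw [h2]
        by_cases hP : st.1 = [] <;>
          simp [hP, List.getLast?_append, hcons, hg]
      have hlast : g ≠ "" := hc g hmem
      rw [if_pos (by simp [h1, hge]; simpa using hlast), hB]
      have hnew : pvGlue (st.1 ++ [st.2], ([] : List String)) = pvGlue st := by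
        simp [pvGlue, hcur]
      have hnp : pvPend (st.1 ++ [st.2], ([] : List String)) = [""] := by
        simp [pvPend]
      rw [hnew, hnp, h1]
      simp
  · rw [if_pos (by simp [hl])]
    have hB : pvStepB st l = (st.1, st.2 ++ [l]) := by simp [pvStepB, hl]
    rw [hB]
    have hnp : pvPend (st.1, st.2 ++ [l]) = [] := by simp [pvPend]
    have hng : pvGlue (st.1, st.2 ++ [l])
        = pvCat "" st.1 ++ (if st.1 = [] then st.2 ++ [l] else "" :: (st.2 ++ [l])) := by
      simp [pvGlue, pvCat_append_singleton]
    rw [hnp, hng]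
    by_cases hcur : st.2 = []
    · by_cases hP : st.1 = [] <;>
        simp [pvGlue, pvPend, hcur, hP, pvCat]
    · have hog : pvGlue st = pvCat "" st.1 ++ (if st.1 = [] then st.2 else "" :: st.2) := by
        simp [pvGlue, hcur, pvCat_append_singleton]
      have hop : pvPend st = [] := by simp [pvPend, hcur]
      rw [hog, hop]
      by_cases hP : st.1 = [] <;> simp [hP]

-- the core loop invariant: A's accumulator is B's state, flattened, plus a pending blank
theorem pvInv (ls : List String) : ∀ (st : List (List String) × List String),
    (∀ p ∈ st.1, p ≠ []) → (∀ l ∈ st.2, l ≠ "") →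
    List.foldl pvStepA (pvGlue st ++ pvPend st) ls
        = pvGlue (List.foldl pvStepB st ls) ++ pvPend (List.foldl pvStepB st ls)
      ∧ (∀ p ∈ (List.foldl pvStepB st ls).1, p ≠ [])
      ∧ (∀ l ∈ (List.foldl pvStepB st ls).2, l ≠ "") := by
  induction ls with
  | nil => intro st hp hc; exact ⟨rfl, hp, hc⟩
  | cons l ls ih =>
    intro st hp hc
    have hstep := pvStep st l hc
    have hp' : ∀ p ∈ (pvStepB st l).1, p ≠ [] := by
      by_cases hl : l = ""
      · by_cases hcur : st.2 = []
        · simpa [pvStepB, hl, hcur] using hp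
        · intro p hpm
          simp [pvStepB, hl, hcur] at hpm
          rcases hpm with h | h
          · exact hp p h
          · subst h; exact hcur
      · simpa [pvStepB, hl] using hp
    have hc' : ∀ x ∈ (pvStepB st l).2, x ≠ "" := by
      by_cases hl : l = ""
      · by_cases hcur : st.2 = []
        · intro x hx
          simp [pvStepB, hl, hcur] at hx
        · simp [pvStepB, hl, hcur]
      · intro x hx
        simp [pvStepB, hl] at hx
        rcases hx with h | h
        · exact hc x h
        · subst h; exact hl
    rw [List.foldl_cons, List.foldl_cons, hstep]
    exact ih (pvStepB st l) hp' hc'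

theorem pvIc_cons2 (sep a : List Char) (t : List (List Char)) (ht : t ≠ []) :
    List.intercalate sep (a :: t) = a ++ sep ++ List.intercalate sep t := by
  cases t with
  | nil => simp at ht
  | cons b t => simp [List.intercalate, List.intersperse]

-- intercalate over the flattened paragraph list = double intercalate (paragraphs nonempty)
theorem pvJoin (sep : List Char) (pss : List (List (List Char))) (h : ∀ p ∈ pss, p ≠ []) :
    List.intercalate sep (pvCat [] pss)
      = List.intercalate (sep ++ sep) (pss.map (List.intercalate sep)) := by
  induction pss with
  | nil => simp [pvCat, List.intercalate]
  | cons p ps ih =>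
    cases ps with
    | nil => simp [pvCat, List.intercalate]
    | cons q t =>
      have hq : q ≠ [] := h q (by simp)
      have hcat : pvCat ([] : List Char) (p :: q :: t) = p ++ [] :: pvCat [] (q :: t) := by
        simp [pvCat]
      have happ : ∀ (xs ys : List (List Char)), xs ≠ [] → ys ≠ [] →
          List.intercalate sep (xs ++ ys) = List.intercalate sep xs ++ sep ++ List.intercalate sep ys := by
        intro xs ys hxs hys
        induction xs with
        | nil => simp at hxs
        | cons a xs ihx =>
          cases xs with
          | nil =>
            rw [List.singleton_append, pvIc_cons2 sep a ys hys]
            simp [List.intercalate]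
          | cons a2 xs2 =>
            rw [List.cons_append, pvIc_cons2 sep a ((a2 :: xs2) ++ ys) (by simp),
                pvIc_cons2 sep a (a2 :: xs2) (by simp), ihx (by simp)]
            simp
      have hpv : pvCat ([] : List Char) (q :: t) ≠ [] := by
        simp only [pvCat, ne_eq, List.append_eq_nil_iff]
        tauto
      rw [hcat, happ p ([] :: pvCat [] (q :: t)) (h p (by simp)) (by simp),
          pvIc_cons2 sep [] _ hpv, ih (by intro x hx; exact h x (List.mem_cons_of_mem _ hx))]
      have hrhs := pvIc_cons2 (sep ++ sep) (List.intercalate sep p)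
        (List.map (List.intercalate sep) (q :: t)) (by simp)
      conv_rhs => rw [List.map_cons]
      rw [hrhs]
      simp

-- the last line of splitlines.go contains the last character, if it is not a line break
theorem pvGoLastAux (isB : Char → Bool) (hnl : isB '\n' = true) :
    ∀ (n : Nat) (s : List Char), s.length ≤ n → ∀ (hs : s ≠ []), isB (s.getLast hs) = false →
    ∀ (cur : List Char) (acc : List (List Char)),
      ∃ ll, (PySem.Chars.splitlines.go isB s cur acc).getLast? = some ll ∧ s.getLast hs ∈ ll := by
  intro n
  induction n with
  | zero =>
    intro s hlen hs
    cases s with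
    | nil => exact absurd rfl hs
    | cons a t => simp at hlen
  | succ n ih =>
    intro s hlen hs hlast cur acc
    match s, hs with
    | [c], _ =>
      have hc : isB c = false := by simpa using hlast
      rw [PySem.Chars.splitlines.go]
      · simp only [hc, Bool.false_eq_true, if_false]
        rw [PySem.Chars.splitlines.go]
        simp [List.getLast?_reverse]
      · intro rest h1 h2; simp at h2
    | c1 :: c2 :: rest, _ =>
      have hrs : (c2 :: rest : List Char) ≠ [] := by simp
      have hlast' : isB ((c2 :: rest).getLast hrs) = false := by
        rw [← List.getLast_cons_cons]; exact hlast
      have hlen' : (c2 :: rest : List Char).length ≤ n := by simp at hlen ⊢; omega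
      by_cases hcr : c1 = '\x0d' ∧ c2 = '\n'
      · obtain ⟨h1, h2⟩ := hcr
        subst h1; subst h2
        rw [PySem.Chars.splitlines.go]
        cases rest with
        | nil =>
          exfalso
          have : isB '\n' = false := by simpa [List.getLast] using hlast
          rw [this] at hnl; exact Bool.noConfusion hnl
        | cons a t =>
          have hta : (a :: t : List Char) ≠ [] := by simp
          have hl2 : isB ((a :: t).getLast hta) = false := by
            rw [← List.getLast_cons_cons]; exact hlast'
          obtain ⟨ll, hll, hmem⟩ :=
            ih (a :: t) (by simp at hlen' ⊢; omega) hta hl2 [] (cur.reverse :: acc)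
          refine ⟨ll, hll, ?_⟩
          rw [List.getLast_cons_cons, List.getLast_cons_cons]
          exact hmem
      · rw [PySem.Chars.splitlines.go]
        · by_cases hb : isB c1 = true
          · simp only [hb, if_true]
            obtain ⟨ll, hll, hmem⟩ := ih (c2 :: rest) hlen' hrs hlast' [] (cur.reverse :: acc)
            exact ⟨ll, hll, by rw [List.getLast_cons_cons]; exact hmem⟩
          · simp only [Bool.not_eq_true] at hb
            simp only [hb, Bool.false_eq_true, if_false]
            obtain ⟨ll, hll, hmem⟩ := ih (c2 :: rest) hlen' hrs hlast' (c1 :: cur) acc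
            exact ⟨ll, hll, by rw [List.getLast_cons_cons]; exact hmem⟩
        · intro rest' h1 h2
          exact hcr ⟨h1, by injection h2 with ha hb⟩

theorem pvMemDropWhile (p : Char → Bool) (l : List Char) (c : Char) (hc : c ∈ l)
    (hp : p c = false) : c ∈ List.dropWhile p l := by
  have hsplit : List.takeWhile p l ++ List.dropWhile p l = l := List.takeWhile_append_dropWhile
  rw [← hsplit] at hc
  rcases List.mem_append.mp hc with h' | h'
  · have := List.mem_takeWhile_imp h'
    rw [this] at hp; exact Bool.noConfusion hp
  · exact h'

-- a line containing a non-space character strips to a nonempty list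
theorem pvStripNeNil (l : List Char) (c : Char) (hc : c ∈ l)
    (hsp : PySem.Chars.isspace c = false) : PySem.Chars.strip l ≠ [] := by
  intro h
  unfold PySem.Chars.strip PySem.Chars.rstrip PySem.Chars.lstrip at h
  have h1 : ∀ x ∈ (List.dropWhile PySem.Chars.isspace l).reverse, PySem.Chars.isspace x = true := by
    have := (List.dropWhile_eq_nil_iff).mp (by simpa using h)
    simpa using this
  have hmem : c ∈ List.dropWhile PySem.Chars.isspace l := pvMemDropWhile _ _ _ hc hsp
  have := h1 c (by simpa using hmem)
  rw [this] at hsp; exact Bool.noConfusion hsp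

-- the last character of a nonempty strip is not whitespace
theorem pvStripLast (l : List Char) (h : PySem.Chars.strip l ≠ []) :
    PySem.Chars.isspace ((PySem.Chars.strip l).getLast h) = false := by
  unfold PySem.Chars.strip PySem.Chars.rstrip at h ⊢
  set m := (PySem.Chars.lstrip l).reverse with hm
  have hne : List.dropWhile PySem.Chars.isspace m ≠ [] := by
    intro hx; apply h; rw [hx]; rfl
  have hd := List.head_dropWhile_not PySem.Chars.isspace hne
  have hg : ((List.dropWhile PySem.Chars.isspace m).reverse).getLast h
      = (List.dropWhile PySem.Chars.isspace m).head hne := by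
    simp [List.getLast_reverse]
  rw [hg]
  simpa using hd

theorem pvIsB_isspace (c : Char) (h : PySem.Chars.isspace c = false) : pvIsB c = false := by
  unfold pvIsB
  unfold PySem.Chars.isspace at h
  simp only [Bool.or_eq_false_iff, decide_eq_false_iff_not, Bool.and_eq_false_iff] at h ⊢
  omega

theorem pvSplitlines_eq_go (s : List Char) :
    PySem.Chars.splitlines s = PySem.Chars.splitlines.go pvIsB s [] [] := rfl

-- the last stripped line of splitlines (strip text) is nonempty (or there are no lines)
theorem pvLastLine (text : String) :
    ((PySem.Str.splitlines (PySem.Str.strip text)).map PySem.Str.strip) = []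
    ∨ ∃ g, ((PySem.Str.splitlines (PySem.Str.strip text)).map PySem.Str.strip).getLast? = some g
        ∧ g ≠ "" := by
  have htl : (PySem.Str.strip text).toList = PySem.Chars.strip text.toList := by
    simp [PySem.Str.strip, String.toList_ofList]
  by_cases h : PySem.Chars.strip text.toList = []
  · left
    have : PySem.Str.splitlines (PySem.Str.strip text) = [] := by
      unfold PySem.Str.splitlines
      rw [htl, h]
      rfl
    rw [this]; rfl
  · right
    set t := PySem.Chars.strip text.toList with hts
    have hd : PySem.Chars.isspace (t.getLast h) = false := pvStripLast text.toList h
    have hbd : pvIsB (t.getLast h) = false := pvIsB_isspace _ hd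
    obtain ⟨ll, hll, hmem⟩ :=
      pvGoLastAux pvIsB (by decide) t.length t le_rfl h hbd [] []
    refine ⟨PySem.Str.strip (String.ofList ll), ?_, ?_⟩
    · unfold PySem.Str.splitlines
      rw [htl, List.getLast?_map, List.getLast?_map, pvSplitlines_eq_go, hll]
      rfl
    · have hnn : PySem.Chars.strip ll ≠ [] := pvStripNeNil ll (t.getLast h) hmem hd
      intro he
      apply hnn
      have : (PySem.Str.strip (String.ofList ll)).toList = PySem.Chars.strip ll := by
        simp [PySem.Str.strip, String.toList_ofList]
      rw [he] at this
      simpa using this.symm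

-- the double String join over nonempty paragraphs, against the flattened single join
theorem pvJoinStr (P : List (List String)) (hP : ∀ p ∈ P, p ≠ []) :
    PySem.Str.join "\r\n" (pvCat "" P)
      = PySem.Str.join "\r\n\r\n" (P.map (fun p => PySem.Str.join "\r\n" p)) := by
  show String.ofList (PySem.Chars.join "\r\n".toList ((pvCat "" P).map String.toList))
      = String.ofList (PySem.Chars.join "\r\n\r\n".toList
          ((P.map (fun p => PySem.Str.join "\r\n" p)).map String.toList))
  apply congrArg String.ofList
  unfold PySem.Chars.join
  have h1 : (pvCat "" P).map String.toList = pvCat [] (P.map (List.map String.toList)) := by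
    have := pvCat_map String.toList "" P
    simpa using this
  have h2 : (P.map (fun p => PySem.Str.join "\r\n" p)).map String.toList
      = (P.map (List.map String.toList)).map (List.intercalate "\r\n".toList) := by
    rw [List.map_map, List.map_map]
    apply List.map_congr_left
    intro p _
    simp [PySem.Str.join, String.toList_ofList, PySem.Chars.join]
  rw [h1, h2, show ("\r\n\r\n" : String).toList = "\r\n".toList ++ "\r\n".toList from rfl]
  apply pvJoin
  intro p hp
  simp only [List.mem_map] at hp
  obtain ⟨q, hq, rfl⟩ := hp
  simpa using hP q hq

-- ===== VERDICT (by name: the statement is the Claim_ definition above) =====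
theorem clean_plain_py_spec : Claim_equal_clean_plain_py := by
  intro text _
  unfold Spec_clean_plain_py clean_plain_py clean_plain_py_alt
  simp only []
  set raw := PySem.Str.splitlines (PySem.Str.strip text) with hraw
  set ls := raw.map PySem.Str.strip with hls
  have hA : raw.foldl
      (fun lines line =>
        let line := PySem.Str.strip line
        let last_line : Option String := PySem.List.pyGet? lines (-1)
        if line != "" || (match last_line with | some s => s != "" | none => false) then
          lines ++ [line]
        else lines) []
      = List.foldl pvStepA [] ls := by
    rw [hls, List.foldl_map]
    rfl
  have hB : raw.foldl
      (fun (st : List (List String) × List String) line =>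
        let line := PySem.Str.strip line
        if line != "" then (st.1, st.2 ++ [line])
        else if st.2 != [] then (st.1 ++ [st.2], []) else st) ([], [])
      = List.foldl pvStepB ([], []) ls := by
    rw [hls, List.foldl_map]
    rfl
  rw [hA, hB]
  have h0 : pvGlue ([], []) ++ pvPend ([], []) = ([] : List String) := by
    simp [pvGlue, pvPend, pvCat]
  obtain ⟨heq, hp, hc⟩ := pvInv ls ([], []) (by simp) (by simp)
  rw [h0] at heq
  rcases pvLastLine text with hnil | ⟨g, hg, hgne⟩
  · rw [← hls] at hnil
    rw [hnil]
    rfl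
  · rw [← hls] at hg
    have hne : ls ≠ [] := by rintro h; rw [h] at hg; simp at hg
    have hgl : g = ls.getLast hne := by
      have := List.getLast?_eq_some_getLast (l := ls) hne
      rw [this] at hg
      exact (Option.some.injEq _ _ ▸ hg.symm)
    have hsplit : ls = ls.dropLast ++ [g] := by
      rw [hgl]
      exact (List.dropLast_append_getLast hne).symm
    have hcur : (List.foldl pvStepB ([], []) ls).2 ≠ [] := by
      rw [hsplit, List.foldl_append, List.foldl_cons, List.foldl_nil]
      simp [pvStepB, hgne]
    set stF := List.foldl pvStepB ([], []) ls with hstF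
    have hpend : pvPend stF = [] := by simp [pvPend, hcur]
    have hglue : pvGlue stF = pvCat "" (stF.1 ++ [stF.2]) := by
      simp [pvGlue, hcur]
    rw [heq, hpend, hglue, List.append_nil]
    have hbne : (stF.2 != []) = true := by simpa using hcur
    rw [if_pos hbne]
    apply pvJoinStr
    intro p hpmem
    rcases List.mem_append.mp hpmem with h' | h'
    · exact hp p h'
    · have hps : p = stF.2 := by simpa using h'
      rw [hps]
      exact hcur
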